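-- pv_equiv track=rewrite | github.com/mc-Daniil/municipal | Reverse/mini bobry/src/main.py | younger_mini_bobrik
-- ===== SOURCE A (Python) =====
-- def younger_mini_bobrik(root):
--     if len(root) != 24:
--         return False
--
--     parts = [root[i:i+4] for i in range(0, 24, 4)]
--     indexes = [2, 4, 3, 5, 0, 1]
--     res = ""
--     for i in indexes:
--         res += parts[i]
--
--     return res == "uuur1B0b1M1nrrssD0N0tHuu"
-- ===== SOURCE B (Python) =====
-- def younger_mini_bobrik(root):
--     # B: compare directly against the inverse-permuted expected string; no splitting, no loop.
--     return root == "D0N0tHuuuuur1M1n1B0brrss"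
-- ===== Notes on version B (the rewrite author's own statement) =====
-- stated objective: simpler
-- what changed: B inverts the fixed chunk permutation offline and compares root to the single precomputed 24-char constant, eliminating A's slicing, permutation loop and string building.
import Mathlib
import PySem

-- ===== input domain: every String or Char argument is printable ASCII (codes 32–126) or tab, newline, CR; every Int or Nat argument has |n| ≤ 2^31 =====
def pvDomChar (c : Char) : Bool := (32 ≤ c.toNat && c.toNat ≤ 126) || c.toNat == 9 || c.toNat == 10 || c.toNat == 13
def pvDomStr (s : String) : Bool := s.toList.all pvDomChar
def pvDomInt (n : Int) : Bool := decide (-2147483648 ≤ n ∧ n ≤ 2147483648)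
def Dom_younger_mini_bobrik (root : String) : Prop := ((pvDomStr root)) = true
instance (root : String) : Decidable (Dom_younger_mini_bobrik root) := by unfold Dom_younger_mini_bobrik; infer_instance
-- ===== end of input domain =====

-- B replaces A's slice/permute/concat loop by a single comparison against the
-- precomputed inverse-permuted constant; objective: simpler.

-- ===== PORT A =====
def younger_mini_bobrik (root : String) : Bool :=
  if PySem.Str.len root ≠ 24 then false
  else
    let parts := (PySem.List.pyRange 0 24 4).map (fun i => PySem.Str.slice root (some i) (some (i + 4)))
    let res := [(2 : Int), 4, 3, 5, 0, 1].foldl (fun acc i => acc ++ PySem.List.pyGetD parts i "") ""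
    res == "uuur1B0b1M1nrrssD0N0tHuu"

-- ===== PORT B =====
def younger_mini_bobrik_alt (root : String) : Bool :=
  root == "D0N0tHuuuuur1M1n1B0brrss"

-- ===== PRECONDITION & SPEC =====
def Spec_younger_mini_bobrik (root : String) (out : Bool) : Prop := out = younger_mini_bobrik_alt root
instance (root : String) (out : Bool) : Decidable (Spec_younger_mini_bobrik root out) := by unfold Spec_younger_mini_bobrik; infer_instance

-- ===== CLAIM (what is proved, stated in full; the proofs are below) =====
def Claim_equal_younger_mini_bobrik : Prop := ∀ (root : String), Dom_younger_mini_bobrik root → Spec_younger_mini_bobrik root (younger_mini_bobrik root)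

-- ===== LEMMAS AND PROOFS =====

-- A 24-element list permuted by A's chunk order equals A's target iff the list is B's constant.
theorem pv_key (l : List Char) (h : l.length = 24) :
    ((l.drop 8).take 4 ++ ((l.drop 16).take 4 ++ ((l.drop 12).take 4 ++ ((l.drop 20).take 4 ++ (l.take 4 ++ (l.drop 4).take 4))))) = "uuur1B0b1M1nrrssD0N0tHuu".toList
    ↔ l = "D0N0tHuuuuur1M1n1B0brrss".toList := by
  rcases l with _ | ⟨c0, _ | ⟨c1, _ | ⟨c2, _ | ⟨c3, _ | ⟨c4, _ | ⟨c5, _ | ⟨c6, _ | ⟨c7, _ | ⟨c8, _ | ⟨c9, _ | ⟨c10, _ | ⟨c11, _ | ⟨c12, _ | ⟨c13, _ | ⟨c14, _ | ⟨c15, _ | ⟨c16, _ | ⟨c17, _ | ⟨c18, _ | ⟨c19, _ | ⟨c20, _ | ⟨c21, _ | ⟨c22, _ | ⟨c23, _ | ⟨c24, l⟩⟩⟩⟩⟩⟩⟩⟩⟩⟩⟩⟩⟩⟩⟩⟩⟩⟩⟩⟩⟩⟩⟩⟩⟩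
  all_goals simp_all
  constructor <;> intro hh <;> simp_all

theorem pv_beq_toList (a b : String) : (a == b) = (a.toList == b.toList) := by
  simp [String.toList_inj]

theorem pv_slice_toList (root : String) (a b : Nat) :
    (PySem.Str.slice root (some ((a : Nat) : Int)) (some ((b : Nat) : Int))).toList
      = (root.toList.drop a).take (b - a) := by
  simp [PySem.List.slice_natCast]

theorem pv_main (root : String) : younger_mini_bobrik root = younger_mini_bobrik_alt root := by
  by_cases h : root.toList.length = 24
  · have hA : younger_mini_bobrik root
        = ((((((("" : String) ++ PySem.Str.slice root (some 8) (some 12)) ++ PySem.Str.slice root (some 16) (some 20)) ++ PySem.Str.slice root (some 12) (some 16)) ++ PySem.Str.slice root (some 20) (some 24)) ++ PySem.Str.slice root (some 0) (some 4)) ++ PySem.Str.slice root (some 4) (some 8)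
            == "uuur1B0b1M1nrrssD0N0tHuu") := by
      unfold younger_mini_bobrik
      rw [if_neg (by simp [PySem.Str.len_eq, h])]
      rfl
    rw [hA, younger_mini_bobrik_alt, pv_beq_toList, pv_beq_toList, Bool.eq_iff_iff]
    simp only [beq_iff_eq, String.toList_append,
      show ((0 : Int)) = ((0 : Nat) : Int) from rfl, show ((4 : Int)) = ((4 : Nat) : Int) from rfl,
      show ((8 : Int)) = ((8 : Nat) : Int) from rfl, show ((12 : Int)) = ((12 : Nat) : Int) from rfl,
      show ((16 : Int)) = ((16 : Nat) : Int) from rfl, show ((20 : Int)) = ((20 : Nat) : Int) from rfl,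
      show ((24 : Int)) = ((24 : Nat) : Int) from rfl, pv_slice_toList]
    norm_num
    exact pv_key root.toList h
  · have hA : younger_mini_bobrik root = false := by
      unfold younger_mini_bobrik
      have hne : PySem.Str.len root ≠ 24 := by
        simp only [PySem.Str.len_eq, ne_eq]
        exact_mod_cast h
      rw [if_pos hne]
    have hB : younger_mini_bobrik_alt root = false := by
      unfold younger_mini_bobrik_alt
      rw [beq_eq_false_iff_ne]
      intro e
      apply h
      rw [e]
      decide
    rw [hA, hB]

-- ===== VERDICT (by name: the statement is the Claim_ definition above) =====
theorem younger_mini_bobrik_spec : Claim_equal_younger_mini_bobrik := by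
  intro root _
  exact pv_main root
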